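-- pv_equiv track=rewrite | github.com/jeganpillai/python_reference | p0079_number_of_special_characters.py | count_special_letters
-- ===== SOURCE A (Python) =====
-- def count_special_letters(word):
--     small_set = []
--     cnt = 0
--     for i in word:
--         if i.islower():
--             small_set.append(i)
--     for j in word:
--         if j.isupper() and j.lower() in small_set:
--             cnt += 1
--             small_set.remove(j.lower())
--     return cnt
-- ===== SOURCE B (Python) =====
-- def count_special_letters(word):
--     lows = {}
--     ups = {}
--     for c in word:
--         if c.islower():
--             lows[c] = lows.get(c, 0) + 1
--         elif c.isupper():
--             k = c.lower()
--             ups[k] = ups.get(k, 0) + 1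
--     return sum(min(lows.get(k, 0), n) for k, n in ups.items())
-- ===== Notes on version B (the rewrite author's own statement) =====
-- stated objective: alternative
-- what changed: Replaces A's greedy match-and-remove pass over a lowercase list (linear 'in'/remove per uppercase char) with one pass building two frequency tables and a sum of per-letter minimums.
import Mathlib
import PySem

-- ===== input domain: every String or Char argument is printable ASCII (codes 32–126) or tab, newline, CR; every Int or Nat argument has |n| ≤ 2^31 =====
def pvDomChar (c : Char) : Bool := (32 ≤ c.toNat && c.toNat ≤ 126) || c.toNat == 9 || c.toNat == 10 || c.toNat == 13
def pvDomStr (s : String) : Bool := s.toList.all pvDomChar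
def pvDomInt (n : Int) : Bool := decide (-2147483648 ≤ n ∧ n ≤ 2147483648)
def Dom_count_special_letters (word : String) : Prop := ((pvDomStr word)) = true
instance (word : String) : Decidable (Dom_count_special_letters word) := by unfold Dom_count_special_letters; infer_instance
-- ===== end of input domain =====

-- B replaces A's greedy match-and-remove pass with two frequency tables and a sum of per-letter minimums (alternative algorithm, same return value).

-- ===== PORT A =====
def count_special_letters (word : String) : Int :=
  let small_set := word.toList.foldl
    (fun acc i => if PySem.Chars.islower i then acc ++ [i] else acc) []
  let r := word.toList.foldl
    (fun (st : Int × List Char) j =>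
      if PySem.Chars.isupper j && st.2.contains (PySem.Chars.lowerChar j) then
        -- 'small_set.remove(...)' is guarded by the membership test, so remove? is always some here
        (st.1 + 1, (PySem.List.remove? st.2 (PySem.Chars.lowerChar j)).getD st.2)
      else st) (0, small_set)
  r.1

-- ===== PORT B =====
def count_special_letters_alt (word : String) : Int :=
  let p := word.toList.foldl
    (fun (st : PySem.Dict Char Int × PySem.Dict Char Int) c =>
      if PySem.Chars.islower c then
        (st.1.insert c (st.1.getD c 0 + 1), st.2)
      else if PySem.Chars.isupper c then
        (st.1, st.2.insert (PySem.Chars.lowerChar c) (st.2.getD (PySem.Chars.lowerChar c) 0 + 1))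
      else st) (PySem.Dict.empty, PySem.Dict.empty)
  (p.2.items.map (fun kv => min (p.1.getD kv.1 0) kv.2)).sum

-- ===== PRECONDITION & SPEC =====
def Spec_count_special_letters (word : String) (out : Int) : Prop := out = count_special_letters_alt word
instance (word : String) (out : Int) : Decidable (Spec_count_special_letters word out) := by unfold Spec_count_special_letters; infer_instance

-- ===== CLAIM (what is proved, stated in full; the proofs are below) =====
def Claim_equal_count_special_letters : Prop := ∀ (word : String), Dom_count_special_letters word → Spec_count_special_letters word (count_special_letters word)

-- ===== LEMMAS AND PROOFS =====

-- the lowered uppercase letters of cs, in order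
def pvUps (cs : List Char) : List Char :=
  (cs.filter PySem.Chars.isupper).map PySem.Chars.lowerChar

-- the lowercase letters of cs
def pvLows (cs : List Char) : List Char :=
  cs.filter PySem.Chars.islower

-- abstract form of A's second loop
def pvGreedy (s : List Char) : List Char → Int
  | [] => 0
  | l :: t => if l ∈ s then 1 + pvGreedy (s.erase l) t else pvGreedy s t

-- the sum of per-letter minima, over Nat
def pvMins (s t : List Char) : Nat :=
  ∑ k ∈ t.toFinset, min (s.count k) (t.count k)

lemma pv_not_both (c : Char) (h : PySem.Chars.isupper c = true) :
    PySem.Chars.islower c = false := by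
  simp only [PySem.Chars.isupper, Bool.and_eq_true, decide_eq_true_eq] at h
  simp only [PySem.Chars.islower, Bool.and_eq_false_iff, decide_eq_false_iff_not]
  left
  intro hc
  exact absurd (le_trans hc h.2) (by decide)

lemma pvA_loop1 (cs : List Char) :
    cs.foldl (fun acc i => if PySem.Chars.islower i then acc ++ [i] else acc) [] = pvLows cs := by
  simpa [pvLows] using PySem.List.foldl_append_if PySem.Chars.islower id cs []

lemma pvA_loop2 (cs : List Char) : ∀ (cnt : Int) (s : List Char),
    (cs.foldl
      (fun (st : Int × List Char) j =>
        if PySem.Chars.isupper j && st.2.contains (PySem.Chars.lowerChar j) then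
          (st.1 + 1, (PySem.List.remove? st.2 (PySem.Chars.lowerChar j)).getD st.2)
        else st) (cnt, s)).1 = cnt + pvGreedy s (pvUps cs) := by
  induction cs with
  | nil => intro cnt s; simp [pvUps, pvGreedy]
  | cons j cs ih =>
    intro cnt s
    by_cases hu : PySem.Chars.isupper j = true
    · by_cases hm : PySem.Chars.lowerChar j ∈ s
      · rw [List.foldl_cons, if_pos (by simp [hu, List.contains_eq_mem, hm]),
          PySem.List.remove?_eq_some_erase s (PySem.Chars.lowerChar j) hm, Option.getD_some, ih]
        simp [pvUps, pvGreedy, hu, hm]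
        ring
      · rw [List.foldl_cons, if_neg (by simp [List.contains_eq_mem, hm]), ih]
        simp [pvUps, pvGreedy, hu, hm]
    · rw [List.foldl_cons, if_neg (by simp [hu]), ih]
      simp [pvUps, hu]

lemma pvB_loop (cs : List Char) : ∀ (d1 d2 : PySem.Dict Char Int),
    cs.foldl
      (fun (st : PySem.Dict Char Int × PySem.Dict Char Int) c =>
        if PySem.Chars.islower c then
          (st.1.insert c (st.1.getD c 0 + 1), st.2)
        else if PySem.Chars.isupper c then
          (st.1, st.2.insert (PySem.Chars.lowerChar c) (st.2.getD (PySem.Chars.lowerChar c) 0 + 1))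
        else st) (d1, d2)
    = ((pvLows cs).foldl (fun d x => d.insert x (d.getD x 0 + 1)) d1,
       (pvUps cs).foldl (fun d x => d.insert x (d.getD x 0 + 1)) d2) := by
  induction cs with
  | nil => intro d1 d2; simp [pvLows, pvUps]
  | cons c cs ih =>
    intro d1 d2
    by_cases hl : PySem.Chars.islower c = true
    · have hu : PySem.Chars.isupper c = false := by
        by_contra h
        have := pv_not_both c (by revert h; cases PySem.Chars.isupper c <;> simp)
        simp [hl] at this
      simp [pvLows, pvUps, hl, hu, ih]
    · by_cases hu : PySem.Chars.isupper c = true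
      · simp [pvLows, pvUps, hl, hu, ih]
      · simp [pvLows, pvUps, hl, hu, ih]

lemma pvMins_cons_mem (s t : List Char) (l : Char) (h : l ∈ s) :
    pvMins s (l :: t) = 1 + pvMins (s.erase l) t := by
  have hs : 1 ≤ s.count l := List.one_le_count_iff.mpr h
  by_cases ht : l ∈ t
  · have habs : (l :: t).toFinset = t.toFinset := by
      simp [List.toFinset_cons, Finset.insert_eq_self.mpr (List.mem_toFinset.mpr ht)]
    have hlf : l ∈ t.toFinset := List.mem_toFinset.mpr ht
    rw [pvMins, pvMins, habs, ← Finset.add_sum_erase _ _ hlf, ← Finset.add_sum_erase _ _ hlf]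
    have h1 : min (s.count l) ((l :: t).count l) = 1 + min ((s.erase l).count l) (t.count l) := by
      rw [List.count_cons_self, List.count_erase_self]
      omega
    have h2 : ∀ k ∈ t.toFinset.erase l,
        min (s.count k) ((l :: t).count k) = min ((s.erase l).count k) (t.count k) := by
      intro k hk
      have hne : k ≠ l := Finset.ne_of_mem_erase hk
      rw [List.count_cons_of_ne (Ne.symm hne), List.count_erase_of_ne hne]
    rw [Finset.sum_congr rfl h2, h1]
    omega
  · have hlf : l ∉ t.toFinset := fun hc => ht (List.mem_toFinset.mp hc)
    rw [pvMins, pvMins, List.toFinset_cons, Finset.sum_insert hlf]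
    have h1 : min (s.count l) ((l :: t).count l) = 1 := by
      rw [List.count_cons_self, List.count_eq_zero_of_not_mem ht]
      omega
    have h2 : ∀ k ∈ t.toFinset,
        min (s.count k) ((l :: t).count k) = min ((s.erase l).count k) (t.count k) := by
      intro k hk
      have hne : k ≠ l := fun hc => hlf (hc ▸ hk)
      rw [List.count_cons_of_ne (Ne.symm hne), List.count_erase_of_ne hne]
    rw [Finset.sum_congr rfl h2, h1]

lemma pvMins_cons_not_mem (s t : List Char) (l : Char) (h : l ∉ s) :
    pvMins s (l :: t) = pvMins s t := by
  have hs : s.count l = 0 := List.count_eq_zero_of_not_mem h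
  by_cases ht : l ∈ t
  · have habs : (l :: t).toFinset = t.toFinset := by
      simp [List.toFinset_cons, Finset.insert_eq_self.mpr (List.mem_toFinset.mpr ht)]
    rw [pvMins, pvMins, habs]
    refine Finset.sum_congr rfl fun k hk => ?_
    by_cases hne : k = l
    · subst hne; simp [hs]
    · rw [List.count_cons_of_ne (Ne.symm hne)]
  · have hlf : l ∉ t.toFinset := fun hc => ht (List.mem_toFinset.mp hc)
    rw [pvMins, pvMins, List.toFinset_cons, Finset.sum_insert hlf]
    have h1 : min (s.count l) ((l :: t).count l) = 0 := by simp [hs]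
    rw [h1]
    simp only [Nat.zero_add]
    refine Finset.sum_congr rfl fun k hk => ?_
    have hne : k ≠ l := fun hc => hlf (hc ▸ hk)
    rw [List.count_cons_of_ne (Ne.symm hne)]

lemma pvGreedy_eq_mins (t : List Char) : ∀ s, pvGreedy s t = (pvMins s t : Int) := by
  induction t with
  | nil => intro s; simp [pvGreedy, pvMins]
  | cons l t ih =>
    intro s
    by_cases h : l ∈ s
    · rw [pvGreedy, if_pos h, ih, pvMins_cons_mem s t l h]
      push_cast; ring
    · rw [pvGreedy, if_neg h, ih, pvMins_cons_not_mem s t l h]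

lemma pv_toFinset_dedup (t : List Char) : (PySem.List.dedup t).toFinset = t.toFinset := by
  ext a
  simp [List.mem_toFinset]

lemma pv_sum_dedup (s t : List Char) :
    ((PySem.List.dedup t).map (fun k => min ((s.count k : Int)) ((t.count k : Int)))).sum
      = (pvMins s t : Int) := by
  have h1 : (fun k => min ((s.count k : Int)) ((t.count k : Int)))
      = (fun n : Nat => (n : Int)) ∘ (fun k => min (s.count k) (t.count k)) := by
    funext k; simp [Function.comp]
  rw [h1, ← List.map_map, ← Nat.cast_list_sum]
  norm_cast
  rw [pvMins, ← List.sum_toFinset _ (PySem.List.nodup_dedup t), pv_toFinset_dedup]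

-- ===== VERDICT (by name: the statement is the Claim_ definition above) =====
theorem count_special_letters_spec : Claim_equal_count_special_letters := by
  intro word _
  unfold Spec_count_special_letters count_special_letters count_special_letters_alt
  simp only [pvA_loop1, pvA_loop2, pvB_loop,
    PySem.Dict.foldl_insert_getD_add_one_eq_counter, PySem.Dict.items_counter,
    List.map_map, Function.comp_def, PySem.Dict.getD_counter]
  rw [pvGreedy_eq_mins, ← pv_sum_dedup (pvLows word.toList) (pvUps word.toList)]
  simp [PySem.List.dedup_eq_ofList]
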